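-- pv_equiv track=rewrite | github.com/Cocoon-Data-Transformation/cocoon | cocoon_data/utils.py | unescape_regex
-- ===== SOURCE A (Python) =====
-- def unescape_regex(string):
--     characters = [
--         "d", "t", "b", "r", "f", "D", "w", "W", "s", "S", "B", ".",
--         "(", ")", "[", "]", "{", "}", "|", "?", "*", "+", "^", "$"
--     ]
--
--     for char in characters:
--         escaped_char = "\\\\" + char
--         if escaped_char in string:
--             string = string.replace(escaped_char, "\\" + char)
--
--     return string
-- ===== SOURCE B (Python) =====
-- def unescape_regex(string):
--     meta = {
--         "d", "t", "b", "r", "f", "D", "w", "W", "s", "S", "B", ".",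
--         "(", ")", "[", "]", "{", "}", "|", "?", "*", "+", "^", "$"
--     }
--     out = []
--     i = 0
--     n = len(string)
--     while i < n:
--         if (string[i] == "\\" and i + 1 < n and string[i + 1] == "\\"
--                 and i + 2 < n and string[i + 2] in meta):
--             out.append("\\" + string[i + 2])
--             i += 3
--         else:
--             out.append(string[i])
--             i += 1
--     return "".join(out)
-- ===== Notes on version B (the rewrite author's own statement) =====
-- stated objective: alternative
-- what changed: A runs 24 sequential whole-string str.replace passes (one per regex metacharacter); B makes a single left-to-right scan with a three-character lookahead against a precomputed metacharacter set, emitting the reduced escape in one pass.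
import Mathlib
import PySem

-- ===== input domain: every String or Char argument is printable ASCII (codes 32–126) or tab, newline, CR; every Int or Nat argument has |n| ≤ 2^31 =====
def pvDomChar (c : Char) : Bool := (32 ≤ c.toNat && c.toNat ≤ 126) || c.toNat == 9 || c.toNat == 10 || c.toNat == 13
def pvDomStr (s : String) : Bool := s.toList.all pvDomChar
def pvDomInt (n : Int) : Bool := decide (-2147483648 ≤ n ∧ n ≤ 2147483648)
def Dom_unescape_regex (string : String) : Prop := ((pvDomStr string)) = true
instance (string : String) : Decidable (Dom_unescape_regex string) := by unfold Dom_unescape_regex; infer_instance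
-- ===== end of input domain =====

-- B replaces A's 24 sequential whole-string replace passes by one left-to-right scan with a
-- three-character lookahead (alternative decomposition, same exact result).

-- ===== PORT A =====
def unescape_regex (string : String) : String :=
  let characters : List String :=
    ["d", "t", "b", "r", "f", "D", "w", "W", "s", "S", "B", ".",
     "(", ")", "[", "]", "{", "}", "|", "?", "*", "+", "^", "$"]
  characters.foldl
    (fun s char =>
      let escaped_char : String := "\\\\" ++ char
      if PySem.Str.isIn escaped_char s then
        PySem.Str.replace s escaped_char ("\\" ++ char)
      else s)
    string

-- ===== PORT B =====
-- the single left-to-right scan of Source B: at each position, if the next three characters are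
-- backslash, backslash, metacharacter, emit backslash+metacharacter and advance 3, else emit
-- the current character and advance 1
def pvScan (S : PySem.Set Char) : List Char → List Char
  | [] => []
  | [x] => [x]
  | [x, y] => [x, y]
  | x :: y :: z :: rest =>
      if x == '\\' && y == '\\' && PySem.Set.contains S z then
        '\\' :: z :: pvScan S rest
      else
        x :: pvScan S (y :: z :: rest)
termination_by l => l.length

def unescape_regex_alt (string : String) : String :=
  let metaSet : PySem.Set Char :=
    PySem.Set.ofList
      ['d', 't', 'b', 'r', 'f', 'D', 'w', 'W', 's', 'S', 'B', '.',
       '(', ')', '[', ']', '{', '}', '|', '?', '*', '+', '^', '$']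
  String.ofList (pvScan metaSet string.toList)

-- ===== PRECONDITION & SPEC =====
def Spec_unescape_regex (string : String) (out : String) : Prop := out = unescape_regex_alt string
instance (string : String) (out : String) : Decidable (Spec_unescape_regex string out) := by unfold Spec_unescape_regex; infer_instance

-- ===== CLAIM (what is proved, stated in full; the proofs are below) =====
def Claim_equal_unescape_regex : Prop := ∀ (string : String), Dom_unescape_regex string → Spec_unescape_regex string (unescape_regex string)

-- ===== LEMMAS AND PROOFS =====

-- unfolding equations for pvScan
lemma pvScan_nil (S : PySem.Set Char) : pvScan S [] = [] := by rw [pvScan]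
lemma pvScan_one (S : PySem.Set Char) (x : Char) : pvScan S [x] = [x] := by rw [pvScan]
lemma pvScan_two (S : PySem.Set Char) (x y : Char) : pvScan S [x, y] = [x, y] := by rw [pvScan]
lemma pvScan_four (S : PySem.Set Char) (x y z : Char) (rest : List Char) :
    pvScan S (x :: y :: z :: rest) =
      if x == '\\' && y == '\\' && PySem.Set.contains S z then
        '\\' :: z :: pvScan S rest
      else
        x :: pvScan S (y :: z :: rest) := by rw [pvScan]

lemma pvCond_iff (S : PySem.Set Char) (x y z : Char) :
    (x == '\\' && y == '\\' && PySem.Set.contains S z) = true ↔ (x = '\\' ∧ y = '\\' ∧ z ∈ S) := by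
  simp [and_assoc]

-- the scan keeps the first character of its input
lemma pvScan_head (S : PySem.Set Char) (x : Char) (t : List Char) :
    ∃ u, pvScan S (x :: t) = x :: u := by
  match t with
  | [] => exact ⟨[], pvScan_one S x⟩
  | [y] => exact ⟨[y], pvScan_two S x y⟩
  | y :: z :: r =>
    by_cases h : (x == '\\' && y == '\\' && PySem.Set.contains S z) = true
    · have hx : x = '\\' := ((pvCond_iff S x y z).mp h).1
      exact ⟨z :: pvScan S r, by rw [pvScan_four, if_pos h, hx]⟩
    · exact ⟨pvScan S (y :: z :: r), by rw [pvScan_four, if_neg h]⟩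

-- one no-match step of the scan
lemma pvScan_cons (S : PySem.Set Char) (x : Char) (t : List Char)
    (h : ¬ (x = '\\' ∧ ∃ z u, t = '\\' :: z :: u ∧ z ∈ S)) :
    pvScan S (x :: t) = x :: pvScan S t := by
  match t with
  | [] => rw [pvScan_one, pvScan_nil]
  | [y] => rw [pvScan_two, pvScan_one]
  | y :: z :: r =>
    have hc : ¬ (x == '\\' && y == '\\' && PySem.Set.contains S z) = true := by
      rw [pvCond_iff]
      rintro ⟨hx, hy, hz⟩
      exact h ⟨hx, z, r, by rw [hy], hz⟩
    rw [pvScan_four, if_neg hc]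

-- after a backslash whose follower is neither in S nor equal to c,
-- the scan output's second character is never c
lemma pvScan_second (S : PySem.Set Char) (c z : Char) (r : List Char)
    (hzc : z ≠ c) (hcS : c ∉ S) :
    ∃ d u, pvScan S ('\\' :: z :: r) = '\\' :: d :: u ∧ d ≠ c := by
  match r with
  | [] => exact ⟨z, [], pvScan_two S _ z, hzc⟩
  | e :: u =>
    by_cases h : ('\\' == '\\' && z == '\\' && PySem.Set.contains S e) = true
    · obtain ⟨-, -, he⟩ := (pvCond_iff S _ z e).mp h
      refine ⟨e, pvScan S u, by rw [pvScan_four, if_pos h], ?_⟩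
      rintro rfl; exact hcS he
    · obtain ⟨w, hw⟩ := pvScan_head S z (e :: u)
      exact ⟨z, w, by rw [pvScan_four, if_neg h, hw], hzc⟩

-- running the single-character pass after the set pass equals one pass with the enlarged set
lemma pvScan_compose (S : PySem.Set Char) (c : Char)
    (hS : '\\' ∉ S) (hc : c ∉ S) (hbc : c ≠ '\\') (l : List Char) :
    pvScan [c] (pvScan S l) = pvScan (S ++ [c]) l := by
  suffices h : ∀ n (l : List Char), l.length ≤ n →
      pvScan [c] (pvScan S l) = pvScan (S ++ [c]) l from h l.length l le_rfl
  intro n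
  induction n with
  | zero =>
    intro l hl
    have : l = [] := List.eq_nil_of_length_eq_zero (Nat.le_zero.mp hl)
    subst this; rw [pvScan_nil, pvScan_nil, pvScan_nil]
  | succ n ih =>
    intro l hl
    match l with
    | [] => rw [pvScan_nil, pvScan_nil, pvScan_nil]
    | [x] => rw [pvScan_one, pvScan_one, pvScan_one]
    | [x, y] => rw [pvScan_two, pvScan_two, pvScan_two]
    | x :: y :: z :: rest =>
      have hrest : rest.length ≤ n := by simp at hl; omega
      have htail : (y :: z :: rest).length ≤ n := by simp at hl ⊢; omega
      by_cases hA : (x == '\\' && y == '\\' && PySem.Set.contains S z) = true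
      · -- match against S
        obtain ⟨hx, hy, hz⟩ := (pvCond_iff S x y z).mp hA
        have hzbs : z ≠ '\\' := fun h => hS (h ▸ hz)
        have hzc : z ≠ c := fun h => hc (h ▸ hz)
        have hA' : (x == '\\' && y == '\\' && PySem.Set.contains (S ++ [c]) z) = true := by
          rw [pvCond_iff]; exact ⟨hx, hy, List.mem_append_left _ hz⟩
        rw [pvScan_four, if_pos hA, pvScan_four, if_pos hA']
        rw [pvScan_cons [c] '\\' (z :: pvScan S rest)
          (by rintro ⟨-, d, u, hzw, -⟩; exact hzbs (List.cons.inj hzw).1),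
          pvScan_cons [c] z (pvScan S rest)
          (by rintro ⟨hzb, -⟩; exact hzbs hzb)]
        rw [ih rest hrest]
      · by_cases hB : x = '\\' ∧ y = '\\' ∧ z = c
        · -- match against the new character c
          obtain ⟨hx, hy, hz⟩ := hB
          subst hx; subst hy
          have hzS : z ∉ S := fun h => hA ((pvCond_iff S _ _ z).mpr ⟨rfl, rfl, h⟩)
          have hB' : ('\\' == '\\' && '\\' == '\\' && PySem.Set.contains (S ++ [c]) z) = true := by
            rw [pvCond_iff]
            exact ⟨rfl, rfl, List.mem_append_right _ (hz ▸ List.mem_singleton.mpr rfl)⟩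
          have hzbs : z ≠ '\\' := fun h => hbc (h ▸ hz.symm ▸ rfl)
          rw [pvScan_four, if_neg hA,
            pvScan_cons S '\\' (z :: rest) (by rintro ⟨-, d, u, hzw, -⟩; exact hzbs (List.cons.inj hzw).1),
            pvScan_cons S z rest (by rintro ⟨hzb, -⟩; exact hzbs hzb)]
          have hcc : ('\\' == '\\' && '\\' == '\\' && PySem.Set.contains [c] z) = true := by
            rw [pvCond_iff]; exact ⟨rfl, rfl, hz ▸ List.mem_singleton.mpr rfl⟩
          rw [pvScan_four, if_pos hcc, pvScan_four, if_pos hB', ih rest hrest]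
        · -- no match at this position in either pass
          have hA' : ¬ (x == '\\' && y == '\\' && PySem.Set.contains (S ++ [c]) z) = true := by
            rw [pvCond_iff]
            rintro ⟨hx, hy, hz⟩
            rcases List.mem_append.mp hz with h' | h'
            · exact hA ((pvCond_iff S x y z).mpr ⟨hx, hy, h'⟩)
            · exact hB ⟨hx, hy, List.mem_singleton.mp h'⟩
          rw [pvScan_four, if_neg hA, pvScan_four, if_neg hA', ← ih _ htail]
          apply pvScan_cons
          rintro ⟨hx, d, u, hw, hd⟩
          have hd' : d = c := List.mem_singleton.mp hd
          obtain ⟨w, hwhead⟩ := pvScan_head S y (z :: rest)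
          have hy : y = '\\' := by rw [hwhead] at hw; exact (List.cons.inj hw).1
          subst hx; subst hy
          have hzS : z ∉ S := fun h => hA ((pvCond_iff S _ _ z).mpr ⟨rfl, rfl, h⟩)
          have hzc : z ≠ c := fun h => hB ⟨rfl, rfl, h⟩
          obtain ⟨d', u', hsec, hdc⟩ := pvScan_second S c z rest hzc hc
          rw [hsec] at hw
          have : d' = d := (List.cons.inj (List.cons.inj hw).2).1
          exact hdc (this.trans hd')

lemma pvScan_empty (l : List Char) : pvScan ([] : List Char) l = l := by
  induction l using pvScan.induct ([] : List Char) with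
  | case1 => rw [pvScan_nil]
  | case2 x => rw [pvScan_one]
  | case3 x y => rw [pvScan_two]
  | case4 x y z rest h ih => rw [pvCond_iff] at h; simp at h
  | case5 x y z rest h ih => rw [pvScan_four, if_neg h, ih]

-- folding single-character passes equals one pass with the whole set
lemma pvScan_foldl (cs : List Char) (hbs : '\\' ∉ cs) (hnd : cs.Nodup) (l : List Char) :
    cs.foldl (fun l c => pvScan [c] l) l = pvScan cs l := by
  induction cs using List.reverseRecOn generalizing l with
  | nil => rw [pvScan_empty]; rfl
  | append_singleton cs c ih =>
    have hbs' : '\\' ∉ cs := fun h => hbs (List.mem_append_left _ h)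
    have hbc : c ≠ '\\' := fun h => hbs (List.mem_append_right _ (by simp [h]))
    have hnd' : cs.Nodup := (List.nodup_append.mp hnd).1
    have hc : c ∉ cs := by
      have hd := (List.nodup_append.mp hnd).2.2
      intro h
      exact hd c h c (List.mem_singleton.mpr rfl) rfl
    rw [List.foldl_append, ih hbs' hnd', List.foldl_cons, List.foldl_nil,
      pvScan_compose cs c hbs' hc hbc]

-- Python's str.replace on the pattern "\\c" is exactly the single-character scan
lemma replace_go_eq (c : Char) (n : ℕ) (l acc : List Char) (h : l.length ≤ n) :
    PySem.Chars.replace.go ['\\', '\\', c] ['\\', c] n l acc = acc.reverse ++ pvScan [c] l := by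
  induction n generalizing l acc with
  | zero =>
    have : l = [] := List.eq_nil_of_length_eq_zero (Nat.le_zero.mp h)
    subst this
    rw [PySem.Chars.replace.go, pvScan_nil]
  | succ n ih =>
    match l with
    | [] =>
      rw [PySem.Chars.replace.go, pvScan_nil, List.append_nil]
      omega
    | x :: t =>
      rw [PySem.Chars.replace.go]
      by_cases hp : (['\\', '\\', c].isPrefixOf (x :: t)) = true
      · rw [if_pos hp]
        obtain ⟨rest, hrest⟩ := List.isPrefixOf_iff_prefix.mp hp
        have hl : x :: t = '\\' :: '\\' :: c :: rest := hrest.symm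
        have hlen : rest.length ≤ n := by
          have := congrArg List.length hl; simp at this h; omega
        have hdrop : List.drop ['\\', '\\', c].length (x :: t) = rest := by
          rw [hl]; rfl
        rw [hdrop]
        have : (['\\', c] : List Char).reverse = [c, '\\'] := rfl
        rw [this, ih rest ([c, '\\'] ++ acc) hlen]
        have hscan : pvScan [c] (x :: t) = '\\' :: c :: pvScan [c] rest := by
          rw [hl, pvScan_four, if_pos (by rw [pvCond_iff]; exact ⟨rfl, rfl, List.mem_singleton.mpr rfl⟩)]
        rw [hscan]; simp
      · rw [if_neg hp, ih t (x :: acc) (by simp at h ⊢; omega)]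
        have hscan : pvScan [c] (x :: t) = x :: pvScan [c] t := by
          apply pvScan_cons
          rintro ⟨hx, z, u, ht, hz⟩
          have hz' : z = c := List.mem_singleton.mp hz
          exact hp (List.isPrefixOf_iff_prefix.mpr ⟨u, by rw [hx, ht, hz']; rfl⟩)
        rw [hscan]; simp

lemma replace_eq_pvScan (c : Char) (l : List Char) :
    PySem.Chars.replace l ['\\', '\\', c] ['\\', c] = pvScan [c] l := by
  rw [PySem.Chars.replace]
  rw [if_neg (by simp)]
  rw [replace_go_eq c l.length l [] le_rfl]
  rfl

-- with no occurrence of the pattern the scan is the identity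
lemma pvScan_id_of_not_infix (c : Char) (l : List Char)
    (h : ¬ ['\\', '\\', c] <:+: l) : pvScan [c] l = l := by
  induction l using pvScan.induct ([c] : List Char) with
  | case1 => rw [pvScan_nil]
  | case2 x => rw [pvScan_one]
  | case3 x y => rw [pvScan_two]
  | case4 x y z rest hc ih =>
    exfalso
    obtain ⟨hx, hy, hz⟩ := (pvCond_iff _ x y z).mp hc
    have hz' : z = c := List.mem_singleton.mp hz
    exact h (List.IsPrefix.isInfix ⟨rest, by rw [hx, hy, hz']; rfl⟩)
  | case5 x y z rest hc ih =>
    rw [pvScan_four, if_neg hc, ih (fun hi => h (List.infix_cons hi))]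

-- the 24 metacharacters, as characters
def pvCL : List Char :=
  ['d', 't', 'b', 'r', 'f', 'D', 'w', 'W', 's', 'S', 'B', '.',
   '(', ')', '[', ']', '{', '}', '|', '?', '*', '+', '^', '$']

-- A's fold step, named
def pvStepA (s char : String) : String :=
  let escaped_char : String := "\\\\" ++ char
  if PySem.Str.isIn escaped_char s then
    PySem.Str.replace s escaped_char ("\\" ++ char)
  else s

lemma pv_ofList_toList (s : String) (l : List Char) (h : s.toList = l) : s = String.ofList l := by
  rw [← h, String.ofList_toList]

-- A's step on strings is the single-character scan
lemma stepA_eq (c : Char) (s : String) :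
    pvStepA s (String.ofList [c]) = String.ofList (pvScan [c] s.toList) := by
  unfold pvStepA
  have hesc : ("\\\\" ++ String.ofList [c]).toList = ['\\', '\\', c] := by simp
  have hrep : ("\\" ++ String.ofList [c]).toList = ['\\', c] := by simp
  by_cases h : PySem.Str.isIn ("\\\\" ++ String.ofList [c]) s = true
  · rw [if_pos h]
    apply pv_ofList_toList
    rw [PySem.Str.toList_replace, hesc, hrep, replace_eq_pvScan]
  · rw [if_neg h]
    have h' : PySem.Chars.isIn ['\\', '\\', c] s.toList = false := by
      rw [← hesc]
      simpa using (Bool.not_eq_true _).mp (by simpa using h)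
    have hni := PySem.Chars.isIn_eq_false_iff _ _ |>.mp h'
    apply pv_ofList_toList
    rw [pvScan_id_of_not_infix c _ hni]

lemma foldl_stepA_eq (cs : List Char) (s : String) :
    (cs.map (fun c => String.ofList [c])).foldl pvStepA s
      = String.ofList (cs.foldl (fun l c => pvScan [c] l) s.toList) := by
  induction cs generalizing s with
  | nil => simp [String.ofList_toList]
  | cons c cs ih =>
    rw [List.map_cons, List.foldl_cons, List.foldl_cons, ih, stepA_eq]
    simp

lemma unescape_eq_foldl (s : String) :
    unescape_regex s = (pvCL.map (fun c => String.ofList [c])).foldl pvStepA s := by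
  have h : pvCL.map (fun c => String.ofList [c]) =
      ["d", "t", "b", "r", "f", "D", "w", "W", "s", "S", "B", ".",
       "(", ")", "[", "]", "{", "}", "|", "?", "*", "+", "^", "$"] := by decide
  rw [h]; rfl

lemma main_eq (s : String) : unescape_regex s = unescape_regex_alt s := by
  rw [unescape_eq_foldl, foldl_stepA_eq, pvScan_foldl pvCL (by decide) (by decide)]
  have h : PySem.Set.ofList pvCL = pvCL := by decide
  show _ = String.ofList (pvScan (PySem.Set.ofList pvCL) s.toList)
  rw [h]

-- ===== VERDICT (by name: the statement is the Claim_ definition above) =====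
theorem unescape_regex_spec : Claim_equal_unescape_regex := by
  intro s _
  unfold Spec_unescape_regex
  exact main_eq s
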